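-- pv_equiv track=rewrite | github.com/Hritiksonkar/aidetector | ml-service/main.py | _pick_fake_index
-- ===== SOURCE A (Python) =====
-- def _pick_fake_index(id2label: dict | None) -> int:
--     # Prefer explicit labels when present.
--     if isinstance(id2label, dict) and len(id2label) > 0:
--         norm = {int(k): str(v) for k, v in id2label.items()}
--         for idx, label in norm.items():
--             if label.strip().lower() in {"fake", "ai", "generated"}:
--                 return idx
--         for idx, label in norm.items():
--             if "fake" in label.strip().lower() or "ai" in label.strip().lower() or "generated" in label.strip().lower():
--                 return idx
--
--         if len(norm) == 2:
--             # Common convention is 0=Real, 1=Fake, but not guaranteed.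
--             return 1
--
--     # Safe fallback.
--     return 1
-- ===== SOURCE B (Python) =====
-- def _pick_fake_index(id2label: dict | None) -> int:
--     # Single pass over the normalized dict, tracking first exact and first
--     # substring match separately; exact match wins globally, fallback 1.
--     if not isinstance(id2label, dict) or len(id2label) == 0:
--         return 1
--     norm = {int(k): str(v) for k, v in id2label.items()}
--     keywords = ("fake", "ai", "generated")
--     exact = None
--     sub = None
--     for idx, label in norm.items():
--         t = label.strip().lower()
--         if exact is None and t in keywords:
--             exact = idx
--         if sub is None and any(w in t for w in keywords):
--             sub = idx
--     if exact is not None: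
--         return exact
--     if sub is not None:
--         return sub
--     return 1
-- ===== Notes on version B (the rewrite author's own statement) =====
-- stated objective: alternative
-- what changed: Replaces A's two sequential passes over the normalized dict (exact matches first, then substring matches) by a single pass that remembers the first exact-match index and the first substring-match index separately and picks exact over substring over the fallback 1.
import Mathlib
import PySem

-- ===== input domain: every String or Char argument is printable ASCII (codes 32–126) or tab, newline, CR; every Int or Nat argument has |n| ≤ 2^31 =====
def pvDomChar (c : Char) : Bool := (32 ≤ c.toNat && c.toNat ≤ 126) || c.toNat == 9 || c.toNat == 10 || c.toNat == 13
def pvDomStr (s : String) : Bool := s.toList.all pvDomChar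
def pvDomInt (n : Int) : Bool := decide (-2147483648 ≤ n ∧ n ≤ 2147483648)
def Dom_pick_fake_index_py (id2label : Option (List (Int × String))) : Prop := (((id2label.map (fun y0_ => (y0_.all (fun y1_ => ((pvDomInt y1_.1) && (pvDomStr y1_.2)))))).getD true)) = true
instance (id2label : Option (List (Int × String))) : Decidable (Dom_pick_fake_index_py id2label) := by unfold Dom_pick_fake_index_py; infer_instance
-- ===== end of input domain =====

-- B is an 'alternative' decomposition: one pass with two remembered candidates
-- instead of A's two sequential passes over the dict; same cost, return value only.

-- ===== PORT A =====
-- norm = {int(k): str(v) for k, v in id2label.items()}  (int(k)/str(v) are identities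
-- on the declared int/str types; dict semantics via PySem.Dict insert-fold)
def pvMkNorm (xs : List (Int × String)) : PySem.Dict Int String :=
  xs.foldl (fun d p => d.insert p.1 p.2) PySem.Dict.empty

-- first for-loop: return idx when label.strip().lower() in {"fake","ai","generated"}
def pvPassExact : List (Int × String) → Option Int
  | [] => none
  | (k, v) :: rest =>
      let t := PySem.Str.lower (PySem.Str.strip v)
      if t == "fake" || t == "ai" || t == "generated" then some k else pvPassExact rest

-- second for-loop: return idx when a keyword occurs as a substring
def pvPassSub : List (Int × String) → Option Int
  | [] => none
  | (k, v) :: rest =>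
      if PySem.Str.isIn "fake" (PySem.Str.lower (PySem.Str.strip v))
          || PySem.Str.isIn "ai" (PySem.Str.lower (PySem.Str.strip v))
          || PySem.Str.isIn "generated" (PySem.Str.lower (PySem.Str.strip v)) then some k
      else pvPassSub rest

def pick_fake_index_py (id2label : Option (List (Int × String))) : Int :=
  match id2label with
  | none => 1
  | some xs =>
      if xs.isEmpty then 1
      else
        let norm := pvMkNorm xs
        match pvPassExact norm.items with
        | some idx => idx
        | none =>
            match pvPassSub norm.items with
            | some idx => idx
            | none => if norm.size == 2 then 1 else 1  -- 'if len(norm) == 2: return 1' then 'return 1'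

-- ===== PORT B =====
-- single pass: remember first exact-match index and first substring-match index
def pvStep (st : Option Int × Option Int) (p : Int × String) : Option Int × Option Int :=
  let t := PySem.Str.lower (PySem.Str.strip p.2)
  ((if st.1.isNone && (t == "fake" || t == "ai" || t == "generated") then some p.1 else st.1),
   (if st.2.isNone && (PySem.Str.isIn "fake" t || PySem.Str.isIn "ai" t || PySem.Str.isIn "generated" t)
      then some p.1 else st.2))

def pick_fake_index_py_alt (id2label : Option (List (Int × String))) : Int :=
  match id2label with
  | none => 1
  | some xs =>
      if xs.isEmpty then 1
      else
        let norm := pvMkNorm xs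
        let r := norm.items.foldl pvStep (none, none)
        match r.1 with
        | some idx => idx
        | none =>
            match r.2 with
            | some idx => idx
            | none => 1

-- ===== PRECONDITION & SPEC =====
def Spec_pick_fake_index_py (id2label : Option (List (Int × String))) (out : Int) : Prop := out = pick_fake_index_py_alt id2label
instance (id2label : Option (List (Int × String))) (out : Int) : Decidable (Spec_pick_fake_index_py id2label out) := by unfold Spec_pick_fake_index_py; infer_instance

-- ===== CLAIM (what is proved, stated in full; the proofs are below) =====
def Claim_equal_pick_fake_index_py : Prop := ∀ (id2label : Option (List (Int × String))), Dom_pick_fake_index_py id2label → Spec_pick_fake_index_py id2label (pick_fake_index_py id2label)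

-- ===== LEMMAS AND PROOFS =====
theorem foldl_pvStep (l : List (Int × String)) (e s : Option Int) :
    l.foldl pvStep (e, s)
      = ((e.orElse fun _ => pvPassExact l), (s.orElse fun _ => pvPassSub l)) := by
  induction l generalizing e s with
  | nil => cases e <;> cases s <;> rfl
  | cons p rest ih =>
    obtain ⟨k, v⟩ := p
    simp only [List.foldl_cons, pvStep, pvPassExact, pvPassSub]
    cases e <;> cases s <;> simp only [Option.isNone, Bool.true_and, Bool.false_and,
      ih, Option.orElse] <;> split_ifs <;> simp_all [Option.orElse]

-- ===== VERDICT (by name: the statement is the Claim_ definition above) =====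
theorem pick_fake_index_py_spec : Claim_equal_pick_fake_index_py := by
  intro id2label _
  unfold Spec_pick_fake_index_py pick_fake_index_py pick_fake_index_py_alt
  cases id2label with
  | none => rfl
  | some xs =>
    by_cases h : xs.isEmpty <;> simp only [h, if_true, foldl_pvStep, Option.orElse]
    cases hE : pvPassExact (pvMkNorm xs).items <;>
      cases hS : pvPassSub (pvMkNorm xs).items <;>
      simp
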